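-- pv_equiv track=rewrite | github.com/buffett0323/SD2 | dgrammar/wildcard_earley.py | _bitmask_sum
-- ===== SOURCE A (Python) =====
-- def _bitmask_sum(a: int, b: int, limit_mask: int) -> int:
--     """
--     Return bitmask of all (i+j) where bit i is set in a and bit j is set in b,
--     masked to limit_mask to avoid tracking values > total_masks.
--
--     Example: a=0b0110 (values {1,2}), b=0b0011 (values {0,1})
--              result = values {1,2,3} = 0b1110
--     """
--     result = 0
--     tmp_b = b
--     shift = 0
--     while tmp_b:
--         if tmp_b & 1:
--             result |= (a << shift)
--         tmp_b >>= 1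
--         shift += 1
--     return result & limit_mask
-- ===== SOURCE B (Python) =====
-- def _bitmask_sum(a: int, b: int, limit_mask: int) -> int:
--     pa = []
--     i = 0
--     while a:
--         if a & 1:
--             pa.append(i)
--         a >>= 1
--         i += 1
--     pb = []
--     j = 0
--     while b:
--         if b & 1:
--             pb.append(j)
--         b >>= 1
--         j += 1
--     result = 0
--     for i in pa:
--         for j in pb:
--             result |= 1 << (i + j)
--     return result & limit_mask
-- ===== Notes on version B (the rewrite author's own statement) =====
-- stated objective: alternative
-- what changed: B first extracts the explicit set-bit position lists of a and b, then builds the sumset by OR-ing 1<<(i+j) over every position pair, instead of A's bit-parallel shift-OR of the whole word a for each bit of b.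
-- outside the precondition, e.g. on _bitmask_sum(-1, 1, 3): A returns 3, B does not finish within the time limit
import Mathlib
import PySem

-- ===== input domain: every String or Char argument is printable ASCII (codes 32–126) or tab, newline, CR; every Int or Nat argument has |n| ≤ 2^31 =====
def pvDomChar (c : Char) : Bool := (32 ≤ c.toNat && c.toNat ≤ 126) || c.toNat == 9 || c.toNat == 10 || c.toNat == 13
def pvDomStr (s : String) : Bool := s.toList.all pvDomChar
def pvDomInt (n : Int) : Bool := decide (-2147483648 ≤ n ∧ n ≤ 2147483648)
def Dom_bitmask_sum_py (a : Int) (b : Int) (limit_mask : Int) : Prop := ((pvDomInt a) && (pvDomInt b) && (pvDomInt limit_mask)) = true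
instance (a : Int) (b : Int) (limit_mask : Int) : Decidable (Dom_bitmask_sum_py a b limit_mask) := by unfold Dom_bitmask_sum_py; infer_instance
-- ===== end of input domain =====

-- B extracts the set-bit position lists of a and b and ORs 1<<(i+j) over every position pair,
-- instead of A's shift-OR of the whole word a for each set bit of b (alternative decomposition, not faster).


-- ===== PORT A =====
-- Python's `while tmp_b:` never exits for tmp_b < 0 (Python diverges there; outside Pre_),
-- so the port stops on tmp_b ≤ 0; for tmp_b > 0 the guard coincides with `tmp_b != 0`.
-- shift only ever counts up from 0, so it is carried as a Nat.
def pvLoopA (a : Int) (tmp_b : Int) (result : Int) (shift : Nat) : Int :=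
  if h : tmp_b ≤ 0 then result
  else pvLoopA a (tmp_b >>> (1:Nat))
        (if PySem.Int.band tmp_b 1 = 1 then PySem.Int.bor result (a <<< shift) else result)
        (shift + 1)
termination_by tmp_b.toNat
decreasing_by
  have e : tmp_b >>> (1:Nat) = ((tmp_b.toNat >>> 1 : Nat) : Int) := by
    rw [Int.natCast_shiftRight]; congr 1; omega
  rw [e]; simp only [Int.toNat_natCast]; omega

def bitmask_sum_py (a : Int) (b : Int) (limit_mask : Int) : Int :=
  PySem.Int.band (pvLoopA a b 0 0) limit_mask

-- ===== PORT B =====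
-- the two position-collecting while loops of Source B (same ≤ 0 stopping remark as for A's loop;
-- the collected indices count up from 0, so they are Nats)
def pvBitPos (v : Int) (idx : Nat) : List Nat :=
  if h : v ≤ 0 then []
  else (if PySem.Int.band v 1 = 1 then [idx] else []) ++ pvBitPos (v >>> (1:Nat)) (idx + 1)
termination_by v.toNat
decreasing_by
  have e : v >>> (1:Nat) = ((v.toNat >>> 1 : Nat) : Int) := by
    rw [Int.natCast_shiftRight]; congr 1; omega
  rw [e]; simp only [Int.toNat_natCast]; omega

def bitmask_sum_py_alt (a : Int) (b : Int) (limit_mask : Int) : Int :=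
  let pa := pvBitPos a 0
  let pb := pvBitPos b 0
  let result := pa.foldl
    (fun (r : Int) (i : Nat) =>
      pb.foldl (fun (r' : Int) (j : Nat) => PySem.Int.bor r' ((1 : Int) <<< (i + j))) r) 0
  PySem.Int.band result limit_mask

-- ===== PRECONDITION & SPEC =====
-- Pre_ excludes negative b (A's while loop never terminates there) and negative a, where A still
-- returns a value by two's-complement sign extension but B's position-collecting loop does not terminate.
def Pre_bitmask_sum_py (a : Int) (b : Int) (limit_mask : Int) : Prop := 0 ≤ a ∧ 0 ≤ b
instance (a : Int) (b : Int) (limit_mask : Int) : Decidable (Pre_bitmask_sum_py a b limit_mask) := by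
  unfold Pre_bitmask_sum_py; infer_instance
def pvWitness_bitmask_sum_py : Int × Int × Int := (6, 3, 15)

def Spec_bitmask_sum_py (a : Int) (b : Int) (limit_mask : Int) (out : Int) : Prop := out = bitmask_sum_py_alt a b limit_mask
instance (a : Int) (b : Int) (limit_mask : Int) (out : Int) : Decidable (Spec_bitmask_sum_py a b limit_mask out) := by unfold Spec_bitmask_sum_py; infer_instance

-- ===== CLAIM (what is proved, stated in full; the proofs are below) =====
def Claim_equal_bitmask_sum_py : Prop := ∀ (a : Int) (b : Int) (limit_mask : Int), Dom_bitmask_sum_py a b limit_mask → Pre_bitmask_sum_py a b limit_mask → Spec_bitmask_sum_py a b limit_mask (bitmask_sum_py a b limit_mask)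

-- ===== LEMMAS AND PROOFS =====

-- Nat-level copies of the two cores (used only by the proofs)
def nLoopA (a : Nat) (tb : Nat) (r : Nat) (s : Nat) : Nat :=
  if tb = 0 then r
  else nLoopA a (tb / 2) (if tb % 2 = 1 then r ||| (a <<< s) else r) (s + 1)
termination_by tb
decreasing_by omega

def nBitPos (v : Nat) (idx : Nat) : List Nat :=
  if v = 0 then []
  else (if v % 2 = 1 then [idx] else []) ++ nBitPos (v / 2) (idx + 1)
termination_by v
decreasing_by omega

theorem pvLoopA_natCast (a tb r : Nat) (s : Nat) :
    pvLoopA (↑a) (↑tb) (↑r) s = ↑(nLoopA a tb r s) := by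
  fun_induction nLoopA a tb r s with
  | case1 r s =>
      rw [pvLoopA]; simp
  | case2 tb r s h ih =>
      rw [pvLoopA]
      have hne : ¬ ((tb : Int) ≤ 0) := by exact_mod_cast by omega
      rw [dif_neg hne]
      have hsr : ((tb : Int) >>> (1:Nat)) = ((tb / 2 : Nat) : Int) := by
        rw [← Int.natCast_shiftRight]; norm_num [Nat.shiftRight_succ]
      have hband : PySem.Int.band (↑tb) 1 = ((tb &&& 1 : Nat) : Int) := by
        exact_mod_cast PySem.Int.band_natCast tb 1
      rw [hsr, hband, Nat.and_one_is_mod]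
      by_cases hodd : tb % 2 = 1
      · have h1 : ((tb % 2 : Nat) : Int) = 1 := by exact_mod_cast hodd
        simp only [hodd, if_true, dif_pos] at *
        rw [← Int.natCast_shiftLeft, PySem.Int.bor_natCast]
        exact ih
      · have h1 : ¬ (((tb % 2 : Nat) : Int) = 1) := by exact_mod_cast hodd
        simp only [hodd, h1, if_false, dif_neg, not_false_iff] at *
        exact ih

theorem pvBitPos_natCast (v : Nat) (idx : Nat) :
    pvBitPos (↑v) idx = nBitPos v idx := by
  fun_induction nBitPos v idx with
  | case1 idx => rw [pvBitPos]; simp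
  | case2 v idx h ih =>
      rw [pvBitPos]
      have hne : ¬ ((v : Int) ≤ 0) := by exact_mod_cast by omega
      rw [dif_neg hne]
      have hsr : ((v : Int) >>> (1:Nat)) = ((v / 2 : Nat) : Int) := by
        rw [← Int.natCast_shiftRight]; norm_num [Nat.shiftRight_succ]
      have hband : PySem.Int.band (↑v) 1 = ((v &&& 1 : Nat) : Int) := by
        exact_mod_cast PySem.Int.band_natCast v 1
      rw [hsr, hband, Nat.and_one_is_mod, ih]
      by_cases hodd : v % 2 = 1
      · have h1 : ((v % 2 : Nat) : Int) = 1 := by exact_mod_cast hodd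
        rw [if_pos h1, if_pos hodd]
      · have h1 : ¬ (((v % 2 : Nat) : Int) = 1) := by exact_mod_cast hodd
        rw [if_neg h1, if_neg hodd]

-- big OR of g over a list
def orAll (l : List Nat) (g : Nat → Nat) : Nat := l.foldl (fun acc x => acc ||| g x) 0

theorem foldl_or_init (g : Nat → Nat) (l : List Nat) :
    ∀ r, l.foldl (fun acc x => acc ||| g x) r = r ||| orAll l g := by
  induction l with
  | nil => intro r; simp [orAll]
  | cons x xs ih =>
      intro r
      simp only [orAll, List.foldl_cons, Nat.zero_or] at *
      rw [ih, ih (g x), Nat.or_assoc]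

theorem testBit_orAll (g : Nat → Nat) (l : List Nat) (k : Nat) :
    (orAll l g).testBit k = l.any (fun x => (g x).testBit k) := by
  induction l with
  | nil => simp [orAll, Nat.zero_testBit]
  | cons x xs ih =>
      have : orAll (x :: xs) g = g x ||| orAll xs g := by
        simp only [orAll, List.foldl_cons, Nat.zero_or]
        exact foldl_or_init g xs (g x)
      simp [this, Nat.testBit_or, ih]

theorem mem_nBitPos (v : Nat) (idx i : Nat) :
    i ∈ nBitPos v idx ↔ ∃ j, i = idx + j ∧ v.testBit j := by
  fun_induction nBitPos v idx with
  | case1 idx => simp [Nat.zero_testBit]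
  | case2 v idx h ih =>
      rw [List.mem_append, ih]
      constructor
      · rintro (hm | ⟨j, rfl, hj⟩)
        · have hodd : v % 2 = 1 ∧ i = idx := by
            by_cases hv : v % 2 = 1 <;> simp [hv] at hm <;> exact ⟨hv, hm⟩
          exact ⟨0, by omega, by simpa [Nat.testBit_zero] using hodd.1⟩
        · exact ⟨j + 1, by omega, by rwa [← Nat.testBit_div_two]⟩
      · rintro ⟨j, rfl, hj⟩
        cases j with
        | zero =>
            left
            have hv : v % 2 = 1 := by simpa [Nat.testBit_zero] using hj
            simp [hv]
        | succ j' =>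
            right
            exact ⟨j', by omega, by rwa [Nat.testBit_div_two]⟩

-- A's loop is the fold of a <<< j over the positions of tb offset by s
theorem nLoopA_eq_fold (a : Nat) (tb r s : Nat) :
    nLoopA a tb r s = (nBitPos tb s).foldl (fun acc j => acc ||| (a <<< j)) r := by
  fun_induction nLoopA a tb r s with
  | case1 r s => rw [nBitPos]; simp
  | case2 tb r s h ih =>
      rw [nBitPos, if_neg h, List.foldl_append]
      by_cases hodd : tb % 2 = 1
      · simp only [hodd, if_true, dif_pos, List.foldl_cons, List.foldl_nil] at *
        exact ih
      · simp only [hodd, if_false, dif_neg, not_false_iff, List.foldl_nil] at *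
        exact ih

-- the central identity: shift-OR sumset = pairwise position sumset
theorem core_eq (a b : Nat) :
    nLoopA a b 0 0
      = (nBitPos a 0).foldl
          (fun r i => (nBitPos b 0).foldl (fun r' j => r' ||| (1 <<< (i + j))) r) 0 := by
  rw [nLoopA_eq_fold]
  have hout : (nBitPos a 0).foldl
      (fun r i => (nBitPos b 0).foldl (fun r' j => r' ||| (1 <<< (i + j))) r) 0
      = orAll (nBitPos a 0) (fun i => orAll (nBitPos b 0) (fun j => 1 <<< (i + j))) := by
    simp only [orAll]
    congr 1
    funext r i
    exact foldl_or_init _ _ r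
  rw [hout]
  show orAll (nBitPos b 0) (fun j => a <<< j) = _
  apply Nat.eq_of_testBit_eq
  intro k
  rw [testBit_orAll, testBit_orAll]
  rw [Bool.eq_iff_iff]
  simp only [List.any_eq_true, mem_nBitPos, testBit_orAll, Nat.testBit_shiftLeft,
    Nat.one_shiftLeft, Nat.testBit_two_pow, zero_add, Bool.and_eq_true, decide_eq_true_eq,
    ge_iff_le]
  constructor
  · rintro ⟨x, ⟨_, rfl, hb⟩, hle, ha⟩
    exact ⟨k - x, ⟨_, rfl, ha⟩, x, ⟨_, rfl, hb⟩, by omega⟩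
  · rintro ⟨x, ⟨_, rfl, ha⟩, y, ⟨_, rfl, hb⟩, hk⟩
    exact ⟨y, ⟨_, rfl, hb⟩, by omega, by rw [show k - y = x by omega]; exact ha⟩

-- cast bridge for B's nested fold
theorem foldB_inner_cast (i : Nat) (pb : List Nat) :
    ∀ r : Nat, pb.foldl (fun (r' : Int) (j : Nat) => PySem.Int.bor r' ((1 : Int) <<< (i + j))) (↑r)
      = ↑(pb.foldl (fun r' j => r' ||| (1 <<< (i + j))) r) := by
  induction pb with
  | nil => intro r; simp
  | cons x xs ih =>
      intro r
      simp only [List.foldl_cons]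
      have h1 : ((1 : Int) <<< (i + x)) = ((1 <<< (i + x) : Nat) : Int) := by
        rw [Int.natCast_shiftLeft]; norm_num
      rw [h1, PySem.Int.bor_natCast, ih]

theorem foldB_outer_cast (pb : List Nat) (pa : List Nat) :
    ∀ r : Nat, pa.foldl
        (fun (r : Int) (i : Nat) => pb.foldl (fun (r' : Int) (j : Nat) => PySem.Int.bor r' ((1 : Int) <<< (i + j))) r) (↑r)
      = ↑(pa.foldl (fun r i => pb.foldl (fun r' j => r' ||| (1 <<< (i + j))) r) r) := by
  induction pa with
  | nil => intro r; simp
  | cons x xs ih =>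
      intro r
      simp only [List.foldl_cons]
      rw [foldB_inner_cast, ih]

-- ===== VERDICT (by name: the statement is the Claim_ definition above) =====
theorem bitmask_sum_py_spec : Claim_equal_bitmask_sum_py := by
  intro a b limit_mask _ hpre
  obtain ⟨ha, hb⟩ := hpre
  unfold Spec_bitmask_sum_py bitmask_sum_py bitmask_sum_py_alt
  obtain ⟨a', rfl⟩ : ∃ a' : Nat, a = ↑a' := ⟨a.toNat, (Int.toNat_of_nonneg ha).symm⟩
  obtain ⟨b', rfl⟩ : ∃ b' : Nat, b = ↑b' := ⟨b.toNat, (Int.toNat_of_nonneg hb).symm⟩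
  have hA : pvLoopA (↑a') (↑b') 0 0 = ↑(nLoopA a' b' 0 0) := by
    exact_mod_cast pvLoopA_natCast a' b' 0 0
  have hB := foldB_outer_cast (nBitPos b' 0) (nBitPos a' 0) 0
  simp only [Nat.cast_zero] at hB
  simp only [hA, pvBitPos_natCast, hB, core_eq]
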